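-- pv_equiv track=rewrite | github.com/IniGabriel/clustering-pangan | app/pages/summary.py | find_silhouette_col
-- ===== SOURCE A (Python) =====
-- def find_silhouette_col(columns):
--     cols = [c.strip() for c in columns]
--     # kandidat nama yang sering muncul
--     candidates = [
--         "Silhouette", "Silhouette Avg", "Silhouette Score",
--         # toleransi typo
--         "ilhouette", "ilouette", "Silouette", "Silhoutte"
--     ]
--     for cand in candidates:
--         for c in cols:
--             if cand.lower() in c.lower():
--                 return c
--     # fallback: cari yang mengandung 'sil'
--     for c in cols:
--         if "sil" in c.lower():
--             return c
--     return None
-- ===== SOURCE B (Python) =====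
-- def find_silhouette_col(columns):
--     cols = [c.strip() for c in columns]
--     # priority list, highest first; 'sil' fallback has lowest priority
--     priority = ["silhouette", "silhouette avg", "silhouette score",
--                 "ilhouette", "ilouette", "silouette", "silhoutte", "sil"]
--     best = None  # (rank, column); first column wins ties, so strict '<' only
--     for c in cols:
--         low = c.lower()
--         for r, p in enumerate(priority):
--             if p in low:
--                 if best is None or r < best[0]:
--                     best = (r, c)
--                 break
--     return best[1] if best is not None else None
-- ===== Notes on version B (the rewrite author's own statement) =====
-- stated objective: alternative
-- what changed: Replaces the candidate-outer nested scan with early return (plus a separate 'sil' fallback pass) by one single pass over the columns that computes each column's priority rank against an extended priority list and keeps the minimum (rank, first occurrence).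
import Mathlib
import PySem

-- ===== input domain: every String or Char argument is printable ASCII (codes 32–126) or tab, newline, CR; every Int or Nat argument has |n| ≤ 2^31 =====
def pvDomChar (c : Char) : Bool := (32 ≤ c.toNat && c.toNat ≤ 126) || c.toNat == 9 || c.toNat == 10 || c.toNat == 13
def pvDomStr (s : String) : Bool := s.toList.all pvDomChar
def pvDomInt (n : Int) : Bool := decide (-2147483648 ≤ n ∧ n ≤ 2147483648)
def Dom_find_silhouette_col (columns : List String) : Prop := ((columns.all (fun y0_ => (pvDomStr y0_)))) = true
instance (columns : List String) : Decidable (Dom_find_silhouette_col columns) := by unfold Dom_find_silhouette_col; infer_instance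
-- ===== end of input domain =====

-- B replaces A's candidate-outer nested scan (plus a separate 'sil' fallback pass) by one
-- single pass over the columns keeping the column of minimal priority rank (alternative
-- decomposition, same cost).

-- ===== PORT A =====
def pvCandidates : List String :=
  ["Silhouette", "Silhouette Avg", "Silhouette Score",
   "ilhouette", "ilouette", "Silouette", "Silhoutte"]

-- for cand in candidates: for c in cols: if cand.lower() in c.lower(): return c
def pvLoopA : List String → List String → Option String
  | [], _ => none
  | cand :: rest, cols =>
    match cols.find? (fun c => PySem.Str.isIn (PySem.Str.lower cand) (PySem.Str.lower c)) with
    | some c => some c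
    | none => pvLoopA rest cols

def find_silhouette_col (columns : List String) : Option String :=
  let cols := columns.map PySem.Str.strip
  match pvLoopA pvCandidates cols with
  | some c => some c
  | none =>
    -- fallback: first c with "sil" in c.lower()
    match cols.find? (fun c => PySem.Str.isIn "sil" (PySem.Str.lower c)) with
    | some c => some c
    | none => none

-- ===== PORT B =====
def pvPriority : List String :=
  ["silhouette", "silhouette avg", "silhouette score",
   "ilhouette", "ilouette", "silouette", "silhoutte", "sil"]

-- smallest r with priority[r] in low (inner for/break of B)
def pvRank (Q : List String) (low : String) : Option Nat :=
  Q.findIdx? (fun p => PySem.Str.isIn p low)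

-- loop body of B: update best = (rank, column) on strictly smaller rank
def pvStep (Q : List String) (best : Option (Nat × String)) (c : String) : Option (Nat × String) :=
  match pvRank Q (PySem.Str.lower c) with
  | none => best
  | some r =>
    match best with
    | none => some (r, c)
    | some (rb, cb) => if r < rb then some (r, c) else some (rb, cb)

def find_silhouette_col_alt (columns : List String) : Option String :=
  let cols := columns.map PySem.Str.strip
  match cols.foldl (pvStep pvPriority) none with
  | some (_, c) => some c
  | none => none

-- ===== PRECONDITION & SPEC =====
def Spec_find_silhouette_col (columns : List String) (out : Option String) : Prop := out = find_silhouette_col_alt columns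
instance (columns : List String) (out : Option String) : Decidable (Spec_find_silhouette_col columns out) := by unfold Spec_find_silhouette_col; infer_instance

-- ===== CLAIM (what is proved, stated in full; the proofs are below) =====
def Claim_equal_find_silhouette_col : Prop := ∀ (columns : List String), Dom_find_silhouette_col columns → Spec_find_silhouette_col columns (find_silhouette_col columns)

-- ===== LEMMAS AND PROOFS =====

-- A-shaped scan over an already-lowercased priority list
def pvGenLoop : List String → List String → Option String
  | [], _ => none
  | q :: Q', cols =>
    match cols.find? (fun c => PySem.Str.isIn q (PySem.Str.lower c)) with
    | some c => some c
    | none => pvGenLoop Q' cols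

theorem pvLoopA_eq_gen (l cols : List String) :
    pvLoopA l cols = pvGenLoop (l.map PySem.Str.lower) cols := by
  induction l with
  | nil => rfl
  | cons cand rest ih =>
    simp only [pvLoopA, List.map_cons, pvGenLoop]
    cases cols.find? (fun c => PySem.Str.isIn (PySem.Str.lower cand) (PySem.Str.lower c)) with
    | none => simpa using ih
    | some c => rfl

theorem pvGenLoop_append (A B cols : List String) :
    pvGenLoop (A ++ B) cols =
      match pvGenLoop A cols with
      | some c => some c
      | none => pvGenLoop B cols := by
  induction A with
  | nil => rfl
  | cons q A' ih =>
    simp only [List.cons_append, pvGenLoop]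
    cases cols.find? (fun c => PySem.Str.isIn q (PySem.Str.lower c)) <;> simp [ih]

-- rank over an empty priority list is none, so the fold keeps its accumulator
theorem pvFold_nil_prio (cols : List String) (acc : Option (Nat × String)) :
    cols.foldl (pvStep []) acc = acc := by
  induction cols generalizing acc with
  | nil => rfl
  | cons c cs ih => simpa [pvStep, pvRank] using ih acc

def pvShift : Option (Nat × String) → Option (Nat × String) :=
  Option.map (fun rc => (rc.1 + 1, rc.2))

theorem pvRank_cons (q : String) (Q : List String) (low : String) :
    pvRank (q :: Q) low =
      if PySem.Str.isIn q low then some 0 else (pvRank Q low).map (· + 1) := by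
  simp [pvRank, List.findIdx?_cons]

-- when no column matches q, the fold over (q :: Q) is the fold over Q with ranks shifted
theorem pvFold_shift (q : String) (Q : List String) (cols : List String) (acc : Option (Nat × String))
    (h : ∀ c ∈ cols, PySem.Str.isIn q (PySem.Str.lower c) = false) :
    cols.foldl (pvStep (q :: Q)) (pvShift acc) = pvShift (cols.foldl (pvStep Q) acc) := by
  induction cols generalizing acc with
  | nil => rfl
  | cons c cs ih =>
    have hc : PySem.Str.isIn q (PySem.Str.lower c) = false := h c (by simp)
    have hrest : ∀ c' ∈ cs, PySem.Str.isIn q (PySem.Str.lower c') = false :=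
      fun c' hm => h c' (by simp [hm])
    have hstep : pvStep (q :: Q) (pvShift acc) c = pvShift (pvStep Q acc c) := by
      simp only [pvStep, pvRank_cons, hc, Bool.false_eq_true, if_false]
      cases hr : pvRank Q (PySem.Str.lower c) with
      | none => simp
      | some r =>
        cases acc with
        | none => simp [pvShift]
        | some rc =>
          obtain ⟨rb, cb⟩ := rc
          by_cases hlt : r < rb <;> simp [pvShift, hlt]
    simp only [List.foldl_cons, hstep, ih _ hrest]

-- once the best has rank 0 it never changes
theorem pvFold_rank_zero (Q : List String) (cols : List String) (c : String) :
    cols.foldl (pvStep Q) (some (0, c)) = some (0, c) := by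
  induction cols with
  | nil => rfl
  | cons c' cs ih =>
    have : pvStep Q (some (0, c)) c' = some (0, c) := by
      simp only [pvStep]
      cases pvRank Q (PySem.Str.lower c') with
      | none => rfl
      | some r => simp
    simp [this, ih]

-- an accumulator with rank ≥ 1 (or none) stays so while no column matches q
theorem pvFold_pos (q : String) (Q : List String) (cols : List String) (acc : Option (Nat × String))
    (hacc : ∀ rb cb, acc = some (rb, cb) → 1 ≤ rb)
    (h : ∀ c ∈ cols, PySem.Str.isIn q (PySem.Str.lower c) = false) :
    ∀ rb cb, cols.foldl (pvStep (q :: Q)) acc = some (rb, cb) → 1 ≤ rb := by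
  induction cols generalizing acc with
  | nil => simpa using hacc
  | cons c cs ih =>
    intro rb cb hfold
    have hc : PySem.Str.isIn q (PySem.Str.lower c) = false := h c (by simp)
    refine ih (pvStep (q :: Q) acc c) ?_ (fun c' hm => h c' (by simp [hm])) rb cb (by simpa using hfold)
    intro rb' cb' hstep
    revert hstep
    simp only [pvStep, pvRank_cons, hc, Bool.false_eq_true, if_false]
    cases hr : pvRank Q (PySem.Str.lower c) with
    | none => exact fun hs => hacc _ _ hs
    | some r =>
      cases acc with
      | none => intro hs; simp at hs; omega
      | some rc =>
        obtain ⟨rb0, cb0⟩ := rc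
        have h0 : 1 ≤ rb0 := hacc _ _ rfl
        by_cases hlt : r + 1 < rb0 <;> simp [hlt] <;> omega

-- main generalized equivalence: A-shaped scan = min-rank fold, for any priority list
theorem pvGen_eq_fold (Q cols : List String) :
    pvGenLoop Q cols =
      match cols.foldl (pvStep Q) none with
      | some (_, c) => some c
      | none => none := by
  induction Q generalizing cols with
  | nil => simp [pvGenLoop, pvFold_nil_prio]
  | cons q Q' ih =>
    simp only [pvGenLoop]
    cases hf : cols.find? (fun c => PySem.Str.isIn q (PySem.Str.lower c)) with
    | none =>
      have hall : ∀ c ∈ cols, PySem.Str.isIn q (PySem.Str.lower c) = false := by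
        intro c hm
        have := List.find?_eq_none.mp hf c hm
        simpa using this
      have := pvFold_shift q Q' cols none hall
      simp only [pvShift, Option.map_none] at this
      rw [this, ih]
      cases cols.foldl (pvStep Q') none with
      | none => rfl
      | some rc => obtain ⟨r, c⟩ := rc; rfl
    | some c₀ =>
      obtain ⟨h₀, pre, suf, hcols, hpre⟩ := List.find?_eq_some_iff_append.mp hf
      subst hcols
      have hpre' : ∀ c ∈ pre, PySem.Str.isIn q (PySem.Str.lower c) = false := by
        intro c hm; simpa using hpre c hm
      rw [List.foldl_append, List.foldl_cons]
      have hmid : pvStep (q :: Q') (pre.foldl (pvStep (q :: Q')) none) c₀ = some (0, c₀) := by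
        have hko := pvFold_pos q Q' pre none (by simp) hpre'
        simp only [pvStep, pvRank_cons, h₀, if_true]
        cases hacc : pre.foldl (pvStep (q :: Q')) none with
        | none => rfl
        | some rc =>
          obtain ⟨rb, cb⟩ := rc
          have : 1 ≤ rb := hko rb cb hacc
          simp [Nat.lt_of_lt_of_le Nat.zero_lt_one this]
      rw [hmid, pvFold_rank_zero]

theorem pvPriority_eq : pvPriority = pvCandidates.map PySem.Str.lower ++ ["sil"] := by rfl

theorem pvMain (cols : List String) :
    (match pvLoopA pvCandidates cols with
     | some c => some c
     | none =>
       match cols.find? (fun c => PySem.Str.isIn "sil" (PySem.Str.lower c)) with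
       | some c => some c
       | none => none)
    = (match cols.foldl (pvStep pvPriority) none with
       | some (_, c) => some c
       | none => none) := by
  rw [pvLoopA_eq_gen]
  rw [← pvGen_eq_fold]
  rw [pvPriority_eq, pvGenLoop_append]
  cases pvGenLoop (pvCandidates.map PySem.Str.lower) cols with
  | none =>
    simp only [pvGenLoop]
  | some c => rfl

-- ===== VERDICT (by name: the statement is the Claim_ definition above) =====
theorem find_silhouette_col_spec : Claim_equal_find_silhouette_col := by
  intro columns _
  unfold Spec_find_silhouette_col find_silhouette_col find_silhouette_col_alt
  exact pvMain (columns.map PySem.Str.strip)
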